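-- pv_equiv track=rewrite | github.com/Ning0233/DSA | TIP102/u3/4.py | append_animals
-- ===== SOURCE A (Python) =====
-- from collections import deque
--
-- def append_animals(available, preferred):
--     d = deque()
--     j = deque(preferred)
--     for i in available:
--         if j and i == j[0]:
--             d.append(i)
--             j.popleft()
--     return len(j)
-- ===== SOURCE B (Python) =====
-- def append_animals(available, preferred):
--     prefs = list(preferred)
--     it = iter(available)
--     matched = 0
--     for p in prefs:
--         if any(a == p for a in it):
--             matched += 1
--         else:
--             break
--     return len(prefs) - matched
-- ===== Notes on version B (the rewrite author's own statement) =====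
-- stated objective: idiomatic
-- what changed: B loops over preferred and advances a single shared iterator over available with any(), counting matches and subtracting, instead of A's loop over available against a deque of preferred.
import Mathlib
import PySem

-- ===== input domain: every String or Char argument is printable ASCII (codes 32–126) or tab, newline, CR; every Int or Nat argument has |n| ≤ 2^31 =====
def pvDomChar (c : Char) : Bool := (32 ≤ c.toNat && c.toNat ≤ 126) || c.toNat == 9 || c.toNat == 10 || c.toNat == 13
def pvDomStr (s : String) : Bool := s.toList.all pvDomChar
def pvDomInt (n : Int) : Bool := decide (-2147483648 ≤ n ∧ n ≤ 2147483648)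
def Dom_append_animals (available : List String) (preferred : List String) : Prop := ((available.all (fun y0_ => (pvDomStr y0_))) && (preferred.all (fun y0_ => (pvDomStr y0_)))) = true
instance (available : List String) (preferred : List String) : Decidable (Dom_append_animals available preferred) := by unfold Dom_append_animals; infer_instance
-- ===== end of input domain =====

-- B loops over preferred, advancing one shared cursor over available (Python: any() on a shared
-- iterator), instead of A's loop over available against a deque of preferred; objective: idiomatic.

-- ===== PORT A =====
-- A: for i in available: if j and i == j[0]: d.append(i); j.popleft(); return len(j)
-- (loop body of A, over the state (d, j))
def pvStepA (st : List String × List String) (i : String) : List String × List String :=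
  match st.2 with
  | p :: rest => if i == p then (st.1 ++ [i], rest) else st
  | [] => st

def append_animals (available : List String) (preferred : List String) : Int :=
  let st := available.foldl pvStepA ([], preferred)
  (st.2.length : Int)

-- ===== PORT B =====
-- any(a == p for a in it): consume the shared iterator until p is found; some rest = found
def pvAnyAdvance (p : String) : List String → Option (List String)
  | [] => none
  | a :: rest => if a == p then some rest else pvAnyAdvance p rest

-- the for-loop over prefs with the matched counter; break when any() is False
def pvMatchedLoop : List String → List String → Int
  | [], _ => 0
  | p :: ps, it =>
    match pvAnyAdvance p it with
    | some it' => 1 + pvMatchedLoop ps it'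
    | none => 0

def append_animals_alt (available : List String) (preferred : List String) : Int :=
  (preferred.length : Int) - pvMatchedLoop preferred available

-- ===== PRECONDITION & SPEC =====
def Spec_append_animals (available : List String) (preferred : List String) (out : Int) : Prop := out = append_animals_alt available preferred
instance (available : List String) (preferred : List String) (out : Int) : Decidable (Spec_append_animals available preferred out) := by unfold Spec_append_animals; infer_instance

-- ===== CLAIM (what is proved, stated in full; the proofs are below) =====
def Claim_equal_append_animals : Prop := ∀ (available : List String) (preferred : List String), Dom_append_animals available preferred → Spec_append_animals available preferred (append_animals available preferred)

-- ===== LEMMAS AND PROOFS =====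

-- A's loop, with the (output-irrelevant) accumulator d dropped: remaining preferred after the scan
def pvRemA : List String → List String → List String
  | [], j => j
  | a :: av, j =>
    match j with
    | [] => pvRemA av []
    | p :: rest => if a == p then pvRemA av rest else pvRemA av (p :: rest)

theorem pvFold_snd_eq_remA (av : List String) (d j : List String) :
    (av.foldl pvStepA (d, j)).2 = pvRemA av j := by
  induction av generalizing d j with
  | nil => simp [pvRemA]
  | cons a av ih =>
    cases j with
    | nil => simpa [pvStepA, pvRemA] using ih _ []
    | cons p rest =>
      by_cases h : a == p
      · simp only [List.foldl_cons, pvStepA, pvRemA, h, if_true]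
        exact ih _ _
      · simp only [List.foldl_cons, pvStepA, pvRemA, h]
        exact ih _ _

theorem pvRemA_nil (av : List String) : pvRemA av [] = [] := by
  induction av with
  | nil => rfl
  | cons a av ih => simpa [pvRemA] using ih

theorem pvRemA_cons (av : List String) (p : String) (ps : List String) :
    pvRemA av (p :: ps) =
      match pvAnyAdvance p av with
      | some rest => pvRemA rest ps
      | none => p :: ps := by
  induction av generalizing ps with
  | nil => rfl
  | cons a av ih =>
    by_cases h : a == p
    · simp [pvRemA, pvAnyAdvance, h]
    · simp [pvRemA, pvAnyAdvance, h, ih]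

theorem pvRemA_length (j : List String) (av : List String) :
    ((pvRemA av j).length : Int) = (j.length : Int) - pvMatchedLoop j av := by
  induction j generalizing av with
  | nil => simp [pvRemA_nil, pvMatchedLoop]
  | cons p ps ih =>
    rw [pvRemA_cons]
    cases h : pvAnyAdvance p av with
    | none => simp [pvMatchedLoop, h]
    | some rest =>
      simp only [pvMatchedLoop, h, ih rest, List.length_cons]
      push_cast
      ring

-- ===== VERDICT (by name: the statement is the Claim_ definition above) =====
theorem append_animals_spec : Claim_equal_append_animals := by
  intro available preferred _
  show _ = _
  simp only [append_animals, append_animals_alt]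
  rw [pvFold_snd_eq_remA, pvRemA_length]
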